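-- pv_equiv track=rewrite | github.com/0xDanielSec/duel-framework | agents/defender.py | _field_value_summary
-- ===== SOURCE A (Python) =====
-- def _field_value_summary(logs: list[dict], max_vals: int = 6) -> str:
--     """
--     Show distinct values per field across all logs so the LLM can write
--     where conditions that match what is actually in the data.
--     Skips internal _duel_* fields and the 'table' routing field.
--     """
--     if not logs:
--         return "  (no logs)"
--     field_vals: dict[str, list[str]] = {}
--     for log in logs:
--         for k, v in log.items():
--             if k.startswith("_duel") or k == "table":
--                 continue
--             sv = str(v)
--             if k not in field_vals:
--                 field_vals[k] = []
--             if sv not in field_vals[k]: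
--                 field_vals[k].append(sv)
--     lines = []
--     for field in sorted(field_vals):
--         vals = field_vals[field]
--         shown = vals[:max_vals]
--         overflow = f" … +{len(vals) - max_vals} more" if len(vals) > max_vals else ""
--         lines.append(f"  {field}: {shown}{overflow}")
--     return "\n".join(lines)
-- ===== SOURCE B (Python) =====
-- def _field_value_summary(logs: list[dict], max_vals: int = 6) -> str:
--     if not logs:
--         return "  (no logs)"
--     # flatten all logs into one (field, str(value)) stream, skips applied once
--     pairs = [(k, str(v)) for log in logs for k, v in log.items()
--              if not (k.startswith("_duel") or k == "table")]
--     lines = []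
--     for field in sorted({k for k, _ in pairs}):
--         seen = set()
--         vals = []
--         for k, v in pairs:
--             if k == field and v not in seen:
--                 seen.add(v)
--                 vals.append(v)
--         shown = vals[:max_vals]
--         overflow = f" … +{len(vals) - max_vals} more" if len(vals) > max_vals else ""
--         lines.append(f"  {field}: {shown}{overflow}")
--     return "\n".join(lines)
-- ===== Notes on version B (the rewrite author's own statement) =====
-- stated objective: alternative
-- what changed: A accumulates a dict of per-field deduped value lists in a single online pass with an inner membership test; B first flattens the logs into one filtered (field, str(value)) pair stream, takes the sorted set of field names, and then rebuilds each field's distinct values by a separate seen-set scan of the whole stream per field - a flatten/group-by-rescan decomposition with no dict at all, trading speed (one stream scan per field) for the two-phase structure.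
import Mathlib
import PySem

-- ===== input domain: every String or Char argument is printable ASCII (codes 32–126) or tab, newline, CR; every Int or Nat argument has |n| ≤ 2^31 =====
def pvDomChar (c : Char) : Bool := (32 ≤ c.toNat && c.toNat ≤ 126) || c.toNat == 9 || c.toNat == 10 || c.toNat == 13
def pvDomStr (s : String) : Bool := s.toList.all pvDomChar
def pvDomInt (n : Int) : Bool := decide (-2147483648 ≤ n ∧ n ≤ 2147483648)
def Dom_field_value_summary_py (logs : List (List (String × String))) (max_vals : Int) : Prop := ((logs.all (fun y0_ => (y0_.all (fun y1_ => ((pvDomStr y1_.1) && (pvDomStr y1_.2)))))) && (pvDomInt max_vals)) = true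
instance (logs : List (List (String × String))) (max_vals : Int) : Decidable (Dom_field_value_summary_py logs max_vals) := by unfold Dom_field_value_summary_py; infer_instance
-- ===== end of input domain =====

-- B replaces A's online dict-of-deduped-lists accumulation with a flatten-then-group
-- structure: one filtered (field, value) pair stream, sorted set of field names, and a
-- separate seen-set scan of the stream per field; objective: alternative decomposition
-- (it trades speed - one stream scan per field - for the two-phase structure).

-- ===== SHARED FORMATTING HELPERS (Python's f"  {field}: {shown}{overflow}") =====
-- repr of one character inside a Python str repr with quote char q
-- (exact on printable ASCII 32–126 plus tab/newline/CR, the stated domain)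
def pyReprChar (q : Char) (c : Char) : List Char :=
  if c = '\\' then ['\\', '\\']
  else if c = q then ['\\', q]
  else if c = '\t' then ['\\', 't']
  else if c = '\n' then ['\\', 'n']
  else if c = '\r' then ['\\', 'r']
  else [c]

-- Python repr(s): single quotes unless s contains ' and no "
def pyReprStr (s : String) : String :=
  let cs := s.toList
  let q : Char := if cs.contains '\'' && !cs.contains '"' then '"' else '\''
  String.ofList (q :: (cs.flatMap (pyReprChar q) ++ [q]))

-- Python str() of a list of strings: '[' + ', '.join(map(repr, xs)) + ']'
def pyReprStrList (xs : List String) : String :=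
  "[" ++ PySem.Str.join ", " (xs.map pyReprStr) ++ "]"

-- one output line "  {field}: {shown}{overflow}" from the (already final) value list
def fvsLine (max_vals : Int) (field : String) (vals : List String) : String :=
  let shown := PySem.List.slice vals none (some max_vals)
  let overflow := if PySem.List.len vals > max_vals
    then " … +" ++ PySem.Int.toStr (PySem.List.len vals - max_vals) ++ " more"
    else ""
  "  " ++ field ++ ": " ++ pyReprStrList shown ++ overflow

-- ===== PORT A =====
-- A's inner-loop body: skip internal fields; ensure the key exists, then append sv only if new
def fvsStepA (d : PySem.Dict String (List String)) (kv : String × String) :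
    PySem.Dict String (List String) :=
  if PySem.Str.startswith kv.1 "_duel" || kv.1 == "table" then d
  else
    let d1 := if d.contains kv.1 then d else d.insert kv.1 []
    if (d1.getD kv.1 []).contains kv.2 then d1
    else d1.insert kv.1 (d1.getD kv.1 [] ++ [kv.2])

def field_value_summary_py (logs : List (List (String × String))) (max_vals : Int) : String :=
  if logs = [] then "  (no logs)"
  else
    let field_vals := logs.foldl (fun d log => log.foldl fvsStepA d) PySem.Dict.empty
    let lines := (PySem.List.sorted field_vals.keys (fun x => x) false).foldl
      (fun lines field => lines ++ [fvsLine max_vals field (field_vals.getD field [])]) []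
    PySem.Str.join "\n" lines

-- ===== PORT B =====
-- the comprehension's filter: not (k.startswith("_duel") or k == "table")
def fvsKeep (kv : String × String) : Bool :=
  !(PySem.Str.startswith kv.1 "_duel" || kv.1 == "table")

-- B's per-field loop: seen = set(); for (k, v) in pairs:
--   if k == field and v not in seen: seen.add(v); vals.append(v)
def fvsValsB (pairs : List (String × String)) (field : String) : List String :=
  (pairs.foldl
    (fun (st : PySem.Set String × List String) kv =>
      if kv.1 == field && !(PySem.Set.contains st.1 kv.2)
      then (PySem.Set.add st.1 kv.2, st.2 ++ [kv.2]) else st)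
    (PySem.Set.empty, [])).2

def field_value_summary_py_alt (logs : List (List (String × String))) (max_vals : Int) : String :=
  if logs = [] then "  (no logs)"
  else
    let pairs := logs.flatMap (fun log => log.filter fvsKeep)
    let lines := (PySem.List.sorted (PySem.Set.ofList (pairs.map Prod.fst)) (fun x => x) false).foldl
      (fun lines field => lines ++ [fvsLine max_vals field (fvsValsB pairs field)]) []
    PySem.Str.join "\n" lines

-- ===== PRECONDITION & SPEC =====
def Spec_field_value_summary_py (logs : List (List (String × String))) (max_vals : Int) (out : String) : Prop := out = field_value_summary_py_alt logs max_vals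
instance (logs : List (List (String × String))) (max_vals : Int) (out : String) : Decidable (Spec_field_value_summary_py logs max_vals out) := by unfold Spec_field_value_summary_py; infer_instance

-- ===== CLAIM (what is proved, stated in full; the proofs are below) =====
def Claim_equal_field_value_summary_py : Prop := ∀ (logs : List (List (String × String))) (max_vals : Int), Dom_field_value_summary_py logs max_vals → Spec_field_value_summary_py logs max_vals (field_value_summary_py logs max_vals)

-- ===== LEMMAS AND PROOFS =====

-- A's guarded step, case by case
theorem stepA_skip (d : PySem.Dict String (List String)) (kv : String × String)
    (hg : (PySem.Str.startswith kv.1 "_duel" || kv.1 == "table") = true) :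
    fvsStepA d kv = d := by
  unfold fvsStepA
  rw [hg]
  simp

theorem stepA_dup (d : PySem.Dict String (List String)) (kv : String × String)
    (hg : (PySem.Str.startswith kv.1 "_duel" || kv.1 == "table") = false)
    (hc : d.contains kv.1 = true) (hv : kv.2 ∈ d.getD kv.1 []) :
    fvsStepA d kv = d := by
  unfold fvsStepA
  rw [hg, hc]
  simp [hv]

theorem stepA_new (d : PySem.Dict String (List String)) (kv : String × String)
    (hg : (PySem.Str.startswith kv.1 "_duel" || kv.1 == "table") = false)
    (hc : d.contains kv.1 = true) (hv : kv.2 ∉ d.getD kv.1 []) :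
    fvsStepA d kv = d.insert kv.1 (d.getD kv.1 [] ++ [kv.2]) := by
  unfold fvsStepA
  rw [hg, hc]
  simp [hv]

theorem stepA_fresh (d : PySem.Dict String (List String)) (kv : String × String)
    (hg : (PySem.Str.startswith kv.1 "_duel" || kv.1 == "table") = false)
    (hc : d.contains kv.1 = false) :
    fvsStepA d kv = d.insert kv.1 [kv.2] := by
  unfold fvsStepA
  rw [hg, hc]
  simp [PySem.Dict.getD_insert_self, PySem.Dict.insert_insert_self]

-- A's guarded step is the identity on skipped pairs, so its fold over a log
-- is the fold over the kept pairs only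
theorem foldl_stepA_filter (log : List (String × String))
    (d : PySem.Dict String (List String)) :
    log.foldl fvsStepA d = (log.filter fvsKeep).foldl fvsStepA d := by
  induction log generalizing d with
  | nil => rfl
  | cons kv rest ih =>
    simp only [List.foldl_cons]
    by_cases h : fvsKeep kv = true
    · rw [List.filter_cons_of_pos h]
      simp only [List.foldl_cons]
      exact ih _
    · rw [List.filter_cons_of_neg (by simpa using h)]
      have hg : (PySem.Str.startswith kv.1 "_duel" || kv.1 == "table") = true := by
        rcases Bool.eq_false_or_eq_true (PySem.Str.startswith kv.1 "_duel" || kv.1 == "table")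
          with hb | hb
        · exact hb
        · exact absurd (show fvsKeep kv = true by unfold fvsKeep; rw [hb]; rfl) h
      rw [stepA_skip d kv hg]
      exact ih _

-- A's double fold over logs is the single fold over the filtered flattened stream
theorem foldl_stepA_flat (logs : List (List (String × String)))
    (d : PySem.Dict String (List String)) :
    logs.foldl (fun d log => log.foldl fvsStepA d) d
      = (logs.flatMap (fun log => log.filter fvsKeep)).foldl fvsStepA d := by
  induction logs generalizing d with
  | nil => rfl
  | cons log rest ih =>
    simp only [List.foldl_cons, List.flatMap_cons, List.foldl_append]
    rw [foldl_stepA_filter, ih]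

-- proof-side view of B's per-field loop with the seen set erased:
-- since every append happens exactly when the value is new, seen stays equal to vals
def fvsScan (pairs : List (String × String)) (field : String) : List String :=
  pairs.foldl
    (fun vals kv => if kv.1 == field && !vals.contains kv.2 then vals ++ [kv.2] else vals) []

theorem fvsValsB_foldl_diag (ps : List (String × String)) (field : String) (l : List String) :
    ps.foldl
      (fun (st : PySem.Set String × List String) kv =>
        if kv.1 == field && !(PySem.Set.contains st.1 kv.2)
        then (PySem.Set.add st.1 kv.2, st.2 ++ [kv.2]) else st)
      (l, l)
    = (ps.foldl
        (fun vals kv => if kv.1 == field && !vals.contains kv.2 then vals ++ [kv.2] else vals) l,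
       ps.foldl
        (fun vals kv => if kv.1 == field && !vals.contains kv.2 then vals ++ [kv.2] else vals) l) := by
  induction ps generalizing l with
  | nil => rfl
  | cons kv rest ih =>
    simp only [List.foldl_cons]
    by_cases hcond : (kv.1 == field && !l.contains kv.2) = true
    · have hnm : kv.2 ∉ l := by
        rcases Bool.and_eq_true_iff.mp hcond with ⟨-, hnc⟩
        simpa using hnc
      rw [if_pos (by simpa [PySem.Set.contains] using hcond), if_pos hcond,
        PySem.Set.add_of_not_mem hnm]
      exact ih (l ++ [kv.2])
    · rw [if_neg (by simpa [PySem.Set.contains] using hcond), if_neg hcond]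
      exact ih l

theorem fvsValsB_eq_fvsScan (pairs : List (String × String)) (field : String) :
    fvsValsB pairs field = fvsScan pairs field := by
  unfold fvsValsB fvsScan
  rw [show (PySem.Set.empty : PySem.Set String) = ([] : List String) from rfl,
    fvsValsB_foldl_diag]

-- one kept pair appended to the stream: how the per-field scan evolves
theorem fvsScan_append (ps : List (String × String)) (kv : String × String) (k : String) :
    fvsScan (ps ++ [kv]) k
      = if kv.1 == k && !(fvsScan ps k).contains kv.2
        then fvsScan ps k ++ [kv.2] else fvsScan ps k := by
  simp [fvsScan, List.foldl_append]

-- THE INVARIANT: after folding A's step over a stream of kept pairs starting from the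
-- empty dict, the keys are the distinct field names in first-seen order and each field's
-- list is exactly B's per-field dedup scan of the stream
theorem fvsInv (pairs : List (String × String))
    (hkeep : ∀ kv ∈ pairs, fvsKeep kv = true) :
    (pairs.foldl fvsStepA PySem.Dict.empty).keys = PySem.Set.ofList (pairs.map Prod.fst)
    ∧ ∀ k, (pairs.foldl fvsStepA PySem.Dict.empty).getD k [] = fvsScan pairs k := by
  induction pairs using List.reverseRecOn with
  | nil => exact ⟨rfl, fun k => rfl⟩
  | append_singleton ps kv ih =>
    have hps : ∀ p ∈ ps, fvsKeep p = true := fun p hp => hkeep p (by simp [hp])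
    have hkv : fvsKeep kv = true := hkeep kv (by simp)
    have hg : (PySem.Str.startswith kv.1 "_duel" || kv.1 == "table") = false := by
      rcases Bool.eq_false_or_eq_true (PySem.Str.startswith kv.1 "_duel" || kv.1 == "table")
        with hb | hb
      · exact absurd hkv (by unfold fvsKeep; rw [hb]; simp)
      · exact hb
    obtain ⟨ihk, ihv⟩ := ih hps
    rw [List.foldl_append, List.foldl_cons, List.foldl_nil]
    set d := ps.foldl fvsStepA PySem.Dict.empty with hd
    simp only [List.map_append, List.map_cons, List.map_nil]
    rw [PySem.Set.ofList_append_singleton]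
    have hcontains : d.contains kv.1 = true ↔ kv.1 ∈ PySem.Set.ofList (ps.map Prod.fst) := by
      rw [← ihk]; exact PySem.Dict.contains_iff_mem_keys d kv.1
    by_cases hc : d.contains kv.1 = true
    · -- key already present
      have hadd : (PySem.Set.ofList (ps.map Prod.fst)).add kv.1
          = PySem.Set.ofList (ps.map Prod.fst) := PySem.Set.add_of_mem (hcontains.mp hc)
      by_cases hv : kv.2 ∈ d.getD kv.1 []
      · -- value already seen: dict unchanged
        rw [stepA_dup d kv hg hc hv, hadd, ihk]
        refine ⟨rfl, fun k => ?_⟩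
        rw [fvsScan_append, ihv k]
        by_cases hk : kv.1 = k
        · have hvB : kv.2 ∈ fvsScan ps k := by rw [← hk, ← ihv kv.1]; exact hv
          simp [hk, hvB]
        · simp [hk]
      · -- new value for a present key
        rw [stepA_new d kv hg hc hv]
        constructor
        · rw [PySem.Dict.keys_insert_of_contains d _ hc, ihk, hadd]
        · intro k
          rw [fvsScan_append, PySem.Dict.getD_insert]
          by_cases hk : kv.1 = k
          · have hvB : kv.2 ∉ fvsScan ps k := by
              rw [← hk, ← ihv kv.1]; exact hv
            rw [if_pos hk.symm, ihv kv.1, hk]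
            simp [hvB]
          · rw [if_neg (fun h => hk h.symm), ihv k]
            simp [hk]
    · -- fresh key
      have hc' : d.contains kv.1 = false := by simpa using hc
      have hadd : (PySem.Set.ofList (ps.map Prod.fst)).add kv.1
          = PySem.Set.ofList (ps.map Prod.fst) ++ [kv.1] :=
        PySem.Set.add_of_not_mem (fun h => hc (hcontains.mpr h))
      rw [stepA_fresh d kv hg hc']
      constructor
      · rw [PySem.Dict.keys_insert_of_not_contains d [kv.2] hc', ihk, hadd]
      · intro k
        rw [fvsScan_append, PySem.Dict.getD_insert]
        by_cases hk : kv.1 = k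
        · have h0 : fvsScan ps k = [] := by
            rw [← hk, ← ihv kv.1]; exact PySem.Dict.getD_of_not_contains d [] hc'
          rw [if_pos hk.symm]
          simp [hk, h0]
        · rw [if_neg (fun h => hk h.symm), ihv k]
          simp [hk]

-- every pair of the flattened filtered stream passes the filter
theorem keep_of_mem_flat (logs : List (List (String × String))) :
    ∀ kv ∈ logs.flatMap (fun log => log.filter fvsKeep), fvsKeep kv = true := by
  intro kv hkv
  rcases List.mem_flatMap.mp hkv with ⟨log, _, hmem⟩
  exact (List.mem_filter.mp hmem).2

-- ===== VERDICT (by name: the statement is the Claim_ definition above) =====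
theorem field_value_summary_py_spec : Claim_equal_field_value_summary_py := by
  intro logs max_vals _dom
  unfold Spec_field_value_summary_py field_value_summary_py field_value_summary_py_alt
  by_cases hnil : logs = []
  · simp [hnil]
  · simp only [hnil, if_neg, not_false_eq_true]
    set pairs := logs.flatMap (fun log => log.filter fvsKeep) with hpairs
    obtain ⟨hk, hv⟩ := fvsInv pairs (keep_of_mem_flat logs)
    rw [foldl_stepA_flat, ← hpairs, hk]
    simp only [hv, fvsValsB_eq_fvsScan]
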